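-- pv_equiv track=rewrite | github.com/realazthat/libcooking | cooking/satutils.py | calc_term2ci
-- ===== SOURCE A (Python) =====
-- def find_all_variables_in_cnf(cnf):
--     """
--     Returns a set of all variables in the CNF.
--     """
--     all_vars = set()
--     for clause in cnf:
--         for term in clause:
--             variable = abs(term)
--             all_vars.add(variable)
--     return all_vars
--
-- def calc_term2ci(cnf_list):
--     """
--     Returns a dictionary, of the form {term => {clause-integer-index}}.
--
--     This is essentially an index of the terms in the CNF, to find which
--     clauses in the CNF that contain each term.
--
--     This is useful for unit propagation (see
--     http://en.wikipedia.org/wiki/Unit_propagation#Complexity)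
--     among other things.
--
--     The input must be a list-type, as sets have no ordering, and thus
--     the clauses contained within a set cannot be given an integer-index
--     within the CNF.
--     """
--
--     # to obtain all terms, we first obtain all variables
--     all_variables = find_all_variables_in_cnf(cnf_list)
--
--     # the resulting dictionary
--     term2ci = {}
--
--     # we get every term by looping through the variables
--     for variable in all_variables:
--         for term in [variable,-variable]:
--             # default to an empty set of clause-indices
--             term2ci[term] = set()
--
--     for ci,clause in enumerate(cnf_list):
--         for term in clause:
--             term2ci[term].add(ci)
--
--     return term2ci
-- ===== SOURCE B (Python) =====
-- def calc_term2ci(cnf_list):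
--     # Precompute each clause as a set once, and the distinct variables in
--     # first-occurrence order; then build the index by a per-term membership
--     # scan over the clause sets (a dict comprehension), instead of seeding
--     # keys and filling index sets incrementally while walking the clauses.
--     clause_sets = [set(clause) for clause in cnf_list]
--     variables = {}
--     for clause in cnf_list:
--         for term in clause:
--             variables[abs(term)] = None
--     return {t: {ci for ci, cs in enumerate(clause_sets) if t in cs}
--             for v in variables for t in (v, -v)}
-- ===== Notes on version B (the rewrite author's own statement) =====
-- stated objective: alternative
-- what changed: B inverts the construction: instead of pre-seeding every polarity key and incrementally filling index sets while walking the clauses, it precomputes each clause as a set plus the distinct variables, and then builds each term's clause-index set independently by a membership scan over the clause sets in a dict comprehension.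
import Mathlib
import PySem

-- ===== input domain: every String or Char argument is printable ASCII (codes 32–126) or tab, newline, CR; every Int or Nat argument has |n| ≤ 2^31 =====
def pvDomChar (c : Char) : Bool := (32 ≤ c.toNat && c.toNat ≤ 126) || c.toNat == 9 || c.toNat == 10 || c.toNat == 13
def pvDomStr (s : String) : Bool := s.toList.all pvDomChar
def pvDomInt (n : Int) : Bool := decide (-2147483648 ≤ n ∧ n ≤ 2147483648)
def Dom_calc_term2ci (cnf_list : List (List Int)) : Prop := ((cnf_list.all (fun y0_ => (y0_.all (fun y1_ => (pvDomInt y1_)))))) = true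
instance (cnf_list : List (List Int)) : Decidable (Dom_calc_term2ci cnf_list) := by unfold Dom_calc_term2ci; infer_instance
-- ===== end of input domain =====

-- B inverts the construction: A pre-seeds every polarity key and incrementally fills index sets
-- while walking the clauses; B precomputes the clauses as sets and builds each term's index set
-- independently by a per-term membership scan in a dict comprehension (objective: alternative).
-- Python A's `for variable in all_variables` iterates a set whose hash order is unmodelled; the
-- returned dict is compared ignoring key order, so the port iterates the PySem.Set in insertion order.

-- ===== PORT A =====
def pvFindAllVariables (cnf : List (List Int)) : PySem.Set Int :=
  cnf.foldl (fun all_vars clause =>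
    clause.foldl (fun all_vars term => PySem.Set.add all_vars |term|) all_vars) PySem.Set.empty

def calc_term2ci (cnf_list : List (List Int)) : List (Int × List Int) :=
  let all_variables := pvFindAllVariables cnf_list
  let term2ci : PySem.Dict Int (List Int) :=
    all_variables.foldl (fun d var =>      -- `variable` in the Python; renamed (Lean keyword)
      [var, -var].foldl (fun d term => d.insert term PySem.Set.empty) d) PySem.Dict.empty
  -- `term2ci[term].add(ci)`: the key is always present (its variable was collected above), so
  -- Dict.modify with the (never-used) default is exact here.
  let term2ci :=
    (PySem.List.enumerate cnf_list).foldl (fun d p =>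
      p.2.foldl (fun d term => d.modify term PySem.Set.empty (fun s => PySem.Set.add s p.1)) d) term2ci
  term2ci.items

-- ===== PORT B =====
def calc_term2ci_alt (cnf_list : List (List Int)) : List (Int × List Int) :=
  let clause_sets := cnf_list.map (fun clause => PySem.Set.ofList clause)
  let seen_vars : PySem.Dict Int (Option Unit) :=   -- `variables` in the Python; renamed (Lean keyword)
    cnf_list.foldl (fun d clause =>
      clause.foldl (fun d term => d.insert |term| none) d) PySem.Dict.empty
  ((seen_vars.keys).foldl (fun d v =>
      [v, -v].foldl (fun d t =>
        d.insert t ((PySem.List.enumerate clause_sets).foldl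
          (fun s p => if PySem.Set.contains p.2 t then PySem.Set.add s p.1 else s)
          PySem.Set.empty)) d)
    PySem.Dict.empty).items

-- ===== PRECONDITION & SPEC =====
def Spec_calc_term2ci (cnf_list : List (List Int)) (out : List (Int × List Int)) : Prop := out = calc_term2ci_alt cnf_list
instance (cnf_list : List (List Int)) (out : List (Int × List Int)) : Decidable (Spec_calc_term2ci cnf_list out) := by unfold Spec_calc_term2ci; infer_instance

-- ===== CLAIM (what is proved, stated in full; the proofs are below) =====
def Claim_equal_calc_term2ci : Prop := ∀ (cnf_list : List (List Int)), Dom_calc_term2ci cnf_list → Spec_calc_term2ci cnf_list (calc_term2ci cnf_list)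

-- ===== LEMMAS AND PROOFS =====

-- all (clause-index, term) pairs, as in A's fill loop, and both polarity terms of a variable list
def pvFlat (cnf : List (List Int)) (s : Int) : List (Int × Int) :=
  (PySem.List.enumerate cnf s).flatMap (fun p => p.2.map (fun t => (p.1, t)))

def pvTs (vs : List Int) : List Int := vs.flatMap (fun v => [v, -v])

-- B's per-key value
def pvS (cnf : List (List Int)) (t : Int) : List Int :=
  (PySem.List.enumerate (cnf.map (fun c => PySem.Set.ofList c))).foldl
    (fun s p => if PySem.Set.contains p.2 t then PySem.Set.add s p.1 else s) PySem.Set.empty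

-- the two dictionaries the ports return the items of
def pvInit (vs : List Int) : PySem.Dict Int (List Int) :=
  vs.foldl (fun d v => [v, -v].foldl (fun d t => d.insert t PySem.Set.empty) d) PySem.Dict.empty

def pvDA (cnf : List (List Int)) : PySem.Dict Int (List Int) :=
  (PySem.List.enumerate cnf).foldl (fun d p =>
    p.2.foldl (fun d t => d.modify t PySem.Set.empty (fun s => PySem.Set.add s p.1)) d)
    (pvInit (pvFindAllVariables cnf))

def pvDB (cnf : List (List Int)) : PySem.Dict Int (List Int) :=
  ((cnf.foldl (fun d clause =>
      clause.foldl (fun d term => d.insert |term| (none : Option Unit)) d) PySem.Dict.empty).keys).foldl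
    (fun d v => [v, -v].foldl (fun d t => d.insert t (pvS cnf t)) d) PySem.Dict.empty

theorem pvPortA_eq (cnf : List (List Int)) : calc_term2ci cnf = (pvDA cnf).items := rfl

theorem pvPortB_eq (cnf : List (List Int)) : calc_term2ci_alt cnf = (pvDB cnf).items := rfl

theorem pvFlat_foldl {α : Type} (g : α → Int × Int → α) (cnf : List (List Int)) (s : Int) (a : α) :
    (PySem.List.enumerate cnf s).foldl (fun d p => p.2.foldl (fun d t => g d (p.1, t)) d) a
      = (pvFlat cnf s).foldl g a := by
  simp [pvFlat, List.foldl_flatMap, List.foldl_map]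

theorem pvMap_snd_flat (cnf : List (List Int)) (s : Int) :
    (pvFlat cnf s).map (fun p => p.2) = cnf.flatten := by
  induction cnf generalizing s with
  | nil => simp [pvFlat, PySem.List.enumerate_nil]
  | cons c rest ih =>
    simp only [pvFlat, PySem.List.enumerate_cons, List.flatMap_cons, List.map_append,
      List.map_map, List.flatten_cons]
    have h2 := ih (s + 1)
    simp only [pvFlat] at h2
    rw [h2]
    simp

theorem pvVars_eq (cnf : List (List Int)) :
    pvFindAllVariables cnf = PySem.Set.ofList (cnf.flatten.map (fun t => |t|)) := by
  rw [PySem.Set.ofList_eq_foldl, List.foldl_map, List.foldl_flatten]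
  rfl

theorem pvVarsDict_keys (cnf : List (List Int)) :
    (cnf.foldl (fun d clause =>
      clause.foldl (fun d term => d.insert |term| (none : Option Unit)) d) PySem.Dict.empty).keys
      = PySem.Set.ofList (cnf.flatten.map (fun t => |t|)) := by
  rw [show (cnf.foldl (fun d clause =>
        clause.foldl (fun d term => d.insert |term| (none : Option Unit)) d) PySem.Dict.empty)
      = cnf.flatten.foldl (fun d term => d.insert |term| (none : Option Unit)) PySem.Dict.empty from
    List.foldl_flatten.symm]
  rw [PySem.Dict.keys_foldl_insert_key _ (fun t => |t|) (fun _ _ => none), PySem.Dict.keys_empty]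
  simp [PySem.Set.update, PySem.Set.ofList_eq_foldl]

theorem pvUpdate_of_subset (xs : List Int) (s : PySem.Set Int) (h : ∀ x ∈ xs, x ∈ s) :
    PySem.Set.update s xs = s := by
  induction xs generalizing s with
  | nil => rfl
  | cons x xs ih =>
    have hx : PySem.Set.add s x = s := PySem.Set.add_of_mem (h x (by simp))
    show PySem.Set.update (PySem.Set.add s x) xs = s
    rw [hx]
    exact ih s (fun y hy => h y (by simp [hy]))

theorem pvInit_eq (vs : List Int) :
    pvInit vs = (pvTs vs).foldl (fun d t => d.insert t PySem.Set.empty) PySem.Dict.empty := by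
  simp [pvInit, pvTs, List.foldl_flatMap]

theorem pvDB_eq (cnf : List (List Int)) :
    pvDB cnf = (pvTs (PySem.Set.ofList (cnf.flatten.map (fun t => |t|)))).foldl
      (fun d t => d.insert t (pvS cnf t)) PySem.Dict.empty := by
  rw [pvDB, pvVarsDict_keys]
  simp [pvTs, List.foldl_flatMap]

-- getD through a loop of inserts whose value is a function of the key alone
theorem pvGetD_foldl_insert_fun (g : Int → List Int) (ts : List Int) (d : PySem.Dict Int (List Int)) (k : Int) :
    (ts.foldl (fun d t => d.insert t (g t)) d).getD k PySem.Set.empty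
      = if k ∈ ts then g k else d.getD k PySem.Set.empty := by
  induction ts using List.reverseRecOn with
  | nil => simp
  | append_singleton ts t ih =>
    rw [List.foldl_append, List.foldl_cons, List.foldl_nil, PySem.Dict.getD_insert, ih]
    by_cases hkt : k = t
    · simp [hkt]
    · simp [hkt, List.mem_append]

-- once ci is in the set at k, further additions of ci change nothing
theorem pvGetD_preserve (clause : List Int) (ci k : Int) :
    ∀ (d : PySem.Dict Int (List Int)), ci ∈ d.getD k PySem.Set.empty →
      (clause.foldl (fun d t => d.modify t PySem.Set.empty (fun s => PySem.Set.add s ci)) d).getD k PySem.Set.empty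
        = d.getD k PySem.Set.empty := by
  induction clause with
  | nil => intro d _; rfl
  | cons t ts ih =>
    intro d hci
    rw [List.foldl_cons]
    have hgd : (d.modify t PySem.Set.empty (fun s => PySem.Set.add s ci)).getD k PySem.Set.empty
        = d.getD k PySem.Set.empty := by
      rw [PySem.Dict.getD_modify]
      by_cases hkt : k = t
      · subst hkt
        rw [if_pos rfl]
        exact PySem.Set.add_of_mem hci

      · rw [if_neg hkt]
    rw [ih _ (by rw [hgd]; exact hci), hgd]

theorem pvGetD_fillClause (clause : List Int) (ci k : Int) :
    ∀ (d : PySem.Dict Int (List Int)),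
      (clause.foldl (fun d t => d.modify t PySem.Set.empty (fun s => PySem.Set.add s ci)) d).getD k PySem.Set.empty
        = if clause.contains k then PySem.Set.add (d.getD k PySem.Set.empty) ci
          else d.getD k PySem.Set.empty := by
  induction clause with
  | nil => intro d; simp
  | cons t ts ih =>
    intro d
    rw [List.foldl_cons]
    by_cases hkt : t = k
    · subst hkt
      have h1 : (d.modify t PySem.Set.empty (fun s => PySem.Set.add s ci)).getD t PySem.Set.empty
          = PySem.Set.add (d.getD t PySem.Set.empty) ci := by
        rw [PySem.Dict.getD_modify_self]
      rw [pvGetD_preserve ts ci t _ (by rw [h1]; simp [PySem.Set.mem_add]), h1]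
      simp
    · have h1 : (d.modify t PySem.Set.empty (fun s => PySem.Set.add s ci)).getD k PySem.Set.empty
          = d.getD k PySem.Set.empty := by
        rw [PySem.Dict.getD_modify, if_neg (fun h => hkt h.symm)]
      rw [ih, h1]
      rw [show (t :: ts).contains k = ts.contains k from by
        simp only [List.contains_eq_mem, List.mem_cons, decide_eq_decide]
        exact or_iff_right (fun h => hkt h.symm)]

theorem pvGetD_fill (cnf : List (List Int)) : ∀ (s : Int) (d : PySem.Dict Int (List Int)) (k : Int),
    ((PySem.List.enumerate cnf s).foldl (fun d p =>
        p.2.foldl (fun d t => d.modify t PySem.Set.empty (fun s => PySem.Set.add s p.1)) d) d).getD k PySem.Set.empty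
      = (PySem.List.enumerate cnf s).foldl
          (fun acc p => if p.2.contains k then PySem.Set.add acc p.1 else acc) (d.getD k PySem.Set.empty) := by
  induction cnf with
  | nil => intro s d k; simp [PySem.List.enumerate_nil]
  | cons c rest ih =>
    intro s d k
    rw [PySem.List.enumerate_cons, List.foldl_cons, List.foldl_cons, ih,
      pvGetD_fillClause c s k d]

theorem pvS_eq (cnf : List (List Int)) : ∀ (s : Int) (acc : List Int),
    ∀ (k : Int), (PySem.List.enumerate (cnf.map (fun c => PySem.Set.ofList c)) s).foldl
        (fun a p => if PySem.Set.contains p.2 k then PySem.Set.add a p.1 else a) acc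
      = (PySem.List.enumerate cnf s).foldl
          (fun a p => if p.2.contains k then PySem.Set.add a p.1 else a) acc := by
  induction cnf with
  | nil => intro s acc k; simp [PySem.List.enumerate_nil]
  | cons c rest ih =>
    intro s acc k
    rw [List.map_cons, PySem.List.enumerate_cons, PySem.List.enumerate_cons,
      List.foldl_cons, List.foldl_cons, ih]
    have : PySem.Set.contains (PySem.Set.ofList c) k = c.contains k := by
      simp [PySem.Set.contains, List.contains_eq_mem, PySem.Set.mem_ofList]
    rw [this]

theorem pvGetD_init (vs : List Int) (k : Int) :
    (pvInit vs).getD k PySem.Set.empty = PySem.Set.empty := by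
  rw [pvInit_eq, pvGetD_foldl_insert_fun (fun _ => PySem.Set.empty)]
  split <;> simp [PySem.Dict.getD_empty]

def pvStepA (d : PySem.Dict Int (List Int)) (p : Int × Int) : PySem.Dict Int (List Int) :=
  d.modify p.2 PySem.Set.empty (fun s => PySem.Set.add s p.1)

theorem pvDA_flat (cnf : List (List Int)) :
    pvDA cnf = (pvFlat cnf 0).foldl pvStepA (pvInit (pvFindAllVariables cnf)) := by
  show (PySem.List.enumerate cnf 0).foldl
      (fun d p => p.2.foldl (fun d t => pvStepA d (p.1, t)) d)
      (pvInit (pvFindAllVariables cnf)) = _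
  rw [pvFlat_foldl pvStepA cnf 0]

theorem pvKeys_init (vs : List Int) :
    (pvInit vs).keys = PySem.Set.ofList (pvTs vs) := by
  rw [pvInit_eq, PySem.Dict.keys_foldl_insert _ (fun _ _ => PySem.Set.empty), PySem.Dict.keys_empty]
  simp [PySem.Set.update, PySem.Set.ofList_eq_foldl]

theorem pvMem_ts (cnf : List (List Int)) (x : Int) (hx : x ∈ cnf.flatten) :
    x ∈ pvTs (PySem.Set.ofList (cnf.flatten.map (fun t => |t|))) := by
  have hv : |x| ∈ PySem.Set.ofList (cnf.flatten.map (fun t => |t|)) := by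
    rw [PySem.Set.mem_ofList]
    exact List.mem_map.mpr ⟨x, hx, rfl⟩
  rw [pvTs, List.mem_flatMap]
  refine ⟨|x|, hv, ?_⟩
  rcases abs_cases x with ⟨h, _⟩ | ⟨h, _⟩
  · simp [h]
  · simp [h]

theorem pvKeys_DA (cnf : List (List Int)) :
    (pvDA cnf).keys = PySem.Set.ofList (pvTs (PySem.Set.ofList (cnf.flatten.map (fun t => |t|)))) := by
  rw [pvDA_flat]
  show (List.foldl (fun d (p : Int × Int) =>
      d.modify p.2 PySem.Set.empty fun s => PySem.Set.add s p.1)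
      (pvInit (pvFindAllVariables cnf)) (pvFlat cnf 0)).keys = _
  rw [PySem.Dict.keys_foldl_modify_key (pvFlat cnf 0) (fun p : Int × Int => p.2) PySem.Set.empty
      (fun _ p => fun s => PySem.Set.add s p.1),
    pvKeys_init, pvVars_eq, pvMap_snd_flat]
  exact pvUpdate_of_subset _ _ (fun x hx => by
    rw [PySem.Set.mem_ofList]; exact pvMem_ts cnf x hx)

theorem pvKeys_DB (cnf : List (List Int)) :
    (pvDB cnf).keys = PySem.Set.ofList (pvTs (PySem.Set.ofList (cnf.flatten.map (fun t => |t|)))) := by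
  rw [pvDB_eq, PySem.Dict.keys_foldl_insert _ (fun _ t => pvS cnf t), PySem.Dict.keys_empty]
  simp [PySem.Set.update, PySem.Set.ofList_eq_foldl]

theorem pvGetD_DA (cnf : List (List Int)) (k : Int) :
    (pvDA cnf).getD k PySem.Set.empty = pvS cnf k := by
  show ((PySem.List.enumerate cnf 0).foldl (fun d p =>
      p.2.foldl (fun d t => d.modify t PySem.Set.empty (fun s => PySem.Set.add s p.1)) d)
      (pvInit (pvFindAllVariables cnf))).getD k PySem.Set.empty = _
  rw [pvGetD_fill cnf 0 (pvInit (pvFindAllVariables cnf)) k, pvGetD_init, pvS, pvS_eq]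

theorem pvGetD_DB (cnf : List (List Int)) (k : Int) (hk : k ∈ (pvDB cnf).keys) :
    (pvDB cnf).getD k PySem.Set.empty = pvS cnf k := by
  rw [pvKeys_DB, PySem.Set.mem_ofList] at hk
  rw [pvDB_eq, pvGetD_foldl_insert_fun (pvS cnf), if_pos hk]

-- ===== VERDICT (by name: the statement is the Claim_ definition above) =====
theorem calc_term2ci_spec : Claim_equal_calc_term2ci := by
  intro cnf _
  unfold Spec_calc_term2ci
  rw [pvPortA_eq, pvPortB_eq,
    PySem.Dict.items_eq_map_keys _ (by rw [pvKeys_DA] ; exact PySem.Set.nodup_ofList _) PySem.Set.empty,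
    PySem.Dict.items_eq_map_keys _ (by rw [pvKeys_DB] ; exact PySem.Set.nodup_ofList _) PySem.Set.empty,
    pvKeys_DA, pvKeys_DB]
  refine List.map_congr_left (fun k hk => ?_)
  rw [pvGetD_DA, pvGetD_DB]
  rw [pvKeys_DB]; exact hk
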